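-- pv_equiv track=rewrite | github.com/MGezault/Cours | SAE/Python35h/SAE_serpiuto/source/IA.py | calque_serpent
-- ===== SOURCE A (Python) =====
-- def calque_serpent(position:list):
--     """Fonction qui créé un calque autour du serpent sous forme de dictionnaire
--        avec comme clé des coordonnées et comme valeur des informations relative
--        au serpent
--
--     Args:
--         position (list): La position de la tete du serpent sous forme de coordonnées (x, y)
--     Returns:
--         dict: Un dictionnaire avec les coordonées sous forme de tuple (x, y) de
--               chaque case du calque pour clé et qui a pour valeur une liste sous
--               la forme [valeur_case, innondation], avec valeur_case qui represente
--               la valeur de la case aux dites coordonnées et innondation qui est un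
--               espace libre pour pouvoir effectuer la future innondation dans les
--               allentours du serpent
--     """
--     calc_co = dict()
--     mat_claque = []
--     liste_ligne = []
--     for x in range(11):
--         for y in range(11):
--             liste_ligne.append([None, None])
--         mat_claque.append(liste_ligne)
--         liste_ligne = []
--
--     mat_coordonee = []
--     liste_coordonee = []
--     for x in range(11):
--         for y in range(11):
--             liste_coordonee.append((x+position[0]-5, y+position[1]-5))
--         mat_coordonee.append(liste_coordonee)
--         liste_coordonee = []
--
--     for i in range(len(mat_coordonee)):
--         for j in range(len(mat_coordonee[i])):
--             calc_co[mat_coordonee[i][j]] = mat_claque[i][j]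
--
--     return calc_co
-- ===== SOURCE B (Python) =====
-- def calque_serpent(position: list):
--     """Same dict as A, built directly: one double loop, no intermediate matrices."""
--     calc_co = dict()
--     for x in range(11):
--         for y in range(11):
--             calc_co[(x + position[0] - 5, y + position[1] - 5)] = [None, None]
--     return calc_co
-- ===== Notes on version B (the rewrite author's own statement) =====
-- stated objective: simpler
-- what changed: A builds an 11x11 matrix of fresh cells, a second 11x11 matrix of coordinates, then joins them index-by-index into the dict; B drops both intermediate matrices and writes each (coordinate -> [None, None]) entry directly in one double loop.
import Mathlib
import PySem

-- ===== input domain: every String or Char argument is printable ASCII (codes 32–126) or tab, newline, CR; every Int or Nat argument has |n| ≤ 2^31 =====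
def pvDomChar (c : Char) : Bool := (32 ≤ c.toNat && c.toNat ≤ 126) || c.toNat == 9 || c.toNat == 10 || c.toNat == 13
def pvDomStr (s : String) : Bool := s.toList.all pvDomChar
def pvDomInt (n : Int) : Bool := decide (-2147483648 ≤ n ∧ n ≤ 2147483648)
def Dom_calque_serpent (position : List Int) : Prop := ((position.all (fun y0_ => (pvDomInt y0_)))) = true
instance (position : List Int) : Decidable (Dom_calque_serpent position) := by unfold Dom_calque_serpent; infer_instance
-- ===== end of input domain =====

-- B drops A's two intermediate 11x11 matrices and writes each dict entry directly in one double loop (simpler decomposition, same result).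


-- ===== PORT A =====
-- Literal port of A: build the 11x11 matrix of fresh [None, None] cells, then the
-- 11x11 matrix of coordinates, then join them index by index into the dict calc_co.
-- position[0]/position[1] are pyGetD, exact under Pre_ (Raise.InRange).
def pvCalcCoA (position : List Int) : PySem.Dict (Int × Int) (List (Option Int)) :=
  let mat_claque : List (List (List (Option Int))) :=
    (PySem.List.pyRange 0 11 1).foldl (fun mat _x =>
      mat ++ [(PySem.List.pyRange 0 11 1).foldl (fun row _y => row ++ [[none, none]]) []]) []
  let mat_coordonee : List (List (Int × Int)) :=
    (PySem.List.pyRange 0 11 1).foldl (fun mat x =>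
      mat ++ [(PySem.List.pyRange 0 11 1).foldl (fun row y =>
        row ++ [(x + PySem.List.pyGetD position 0 0 - 5, y + PySem.List.pyGetD position 1 0 - 5)]) []]) []
  (PySem.List.pyRange 0 (mat_coordonee.length : Int) 1).foldl (fun d i =>
    (PySem.List.pyRange 0 ((PySem.List.pyGetD mat_coordonee i []).length : Int) 1).foldl (fun d j =>
      d.insert (PySem.List.pyGetD (PySem.List.pyGetD mat_coordonee i []) j (0, 0))
               (PySem.List.pyGetD (PySem.List.pyGetD mat_claque i []) j [])) d) PySem.Dict.empty

def calque_serpent (position : List Int) : List (Int × Int × List (Option Int)) :=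
  (pvCalcCoA position).items.map (fun kv => (kv.1.1, kv.1.2, kv.2))

-- ===== PORT B =====
-- Literal port of B: one double loop writing each (coordinate -> [None, None]) entry directly.
def pvCalcCoB (position : List Int) : PySem.Dict (Int × Int) (List (Option Int)) :=
  (PySem.List.pyRange 0 11 1).foldl (fun d x =>
    (PySem.List.pyRange 0 11 1).foldl (fun d y =>
      d.insert (x + PySem.List.pyGetD position 0 0 - 5, y + PySem.List.pyGetD position 1 0 - 5)
               [none, none]) d) PySem.Dict.empty

def calque_serpent_alt (position : List Int) : List (Int × Int × List (Option Int)) :=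
  (pvCalcCoB position).items.map (fun kv => (kv.1.1, kv.1.2, kv.2))

-- ===== PRECONDITION & SPEC =====
-- Pre_: Python A reads position[0] and position[1]; it raises IndexError when the list is shorter.
def Pre_calque_serpent (position : List Int) : Prop :=
  PySem.Raise.InRange position.length 0 ∧ PySem.Raise.InRange position.length 1
instance (position : List Int) : Decidable (Pre_calque_serpent position) := by
  unfold Pre_calque_serpent; infer_instance
def pvWitness_calque_serpent : List Int := [5, 5]

def Spec_calque_serpent (position : List Int) (out : List (Int × Int × List (Option Int))) : Prop := out = calque_serpent_alt position
instance (position : List Int) (out : List (Int × Int × List (Option Int))) : Decidable (Spec_calque_serpent position out) := by unfold Spec_calque_serpent; infer_instance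

-- ===== CLAIM (what is proved, stated in full; the proofs are below) =====
def Claim_equal_calque_serpent : Prop := ∀ (position : List Int), Dom_calque_serpent position → Pre_calque_serpent position → Spec_calque_serpent position (calque_serpent position)

-- ===== LEMMAS AND PROOFS =====
-- A's three passes (cell matrix, coordinate matrix, index join) build the same dict as B's single double loop.
theorem pv_dict_eq (position : List Int) : pvCalcCoA position = pvCalcCoB position := by
  unfold pvCalcCoA pvCalcCoB
  simp only [PySem.List.foldl_append_singleton_eq_map, List.nil_append, List.length_map,
    PySem.List.length_pyRange_one]
  simp only [sub_zero, Int.reduceToNat, Nat.cast_ofNat]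
  apply PySem.List.foldl_congr_mem
  intro d i hi
  rw [PySem.List.mem_pyRange_one] at hi
  rw [PySem.List.pyGetD_map_pyRange_of_nonneg _ _ _ _ hi.1 hi.2,
      PySem.List.pyGetD_map_pyRange_of_nonneg _ _ _ _ hi.1 hi.2]
  simp only [List.length_map, PySem.List.length_pyRange_one]
  simp only [sub_zero, Int.reduceToNat, Nat.cast_ofNat]
  apply PySem.List.foldl_congr_mem
  intro d j hj
  rw [PySem.List.mem_pyRange_one] at hj
  rw [PySem.List.pyGetD_map_pyRange_of_nonneg _ _ _ _ hj.1 hj.2,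
      PySem.List.pyGetD_map_pyRange_of_nonneg _ _ _ _ hj.1 hj.2]

-- ===== VERDICT (by name: the statement is the Claim_ definition above) =====
theorem calque_serpent_spec : Claim_equal_calque_serpent := by
  intro position _ _
  show calque_serpent position = calque_serpent_alt position
  unfold calque_serpent calque_serpent_alt
  rw [pv_dict_eq]
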